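-- pv_equiv track=rewrite | github.com/chrispito/advent_of_code_2015_python | lib/day_one.py | move_with_position
-- ===== SOURCE A (Python) =====
-- def move_with_position(steps, breack_basement):
--     steps_list = list(steps)
--     iterator = 0
--     position = 0
--     for step in steps_list:
--         position += 1
--         if step == '(':
--             iterator += 1
--         if step == ')':
--             iterator -= 1
--         if iterator == breack_basement:
--             break
--     return {"move": iterator, "position": position}
-- ===== SOURCE B (Python) =====
-- def move_with_position(steps, breack_basement):
--     # Table-then-scan: build the full prefix-sum list, then find the first hit.
--     deltas = [1 if c == '(' else -1 if c == ')' else 0 for c in steps]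
--     prefix = []
--     total = 0
--     for d in deltas:
--         total += d
--         prefix.append(total)
--     for i, v in enumerate(prefix):
--         if v == breack_basement:
--             return {"move": v, "position": i + 1}
--     return {"move": prefix[-1] if prefix else 0, "position": len(prefix)}
-- ===== Notes on version B (the rewrite author's own statement) =====
-- stated objective: alternative
-- what changed: B first materializes the list of per-character deltas and the full cumulative-sum list, then scans it for the first index whose prefix sum equals the target, instead of A's single stateful loop with an early break.
import Mathlib
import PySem

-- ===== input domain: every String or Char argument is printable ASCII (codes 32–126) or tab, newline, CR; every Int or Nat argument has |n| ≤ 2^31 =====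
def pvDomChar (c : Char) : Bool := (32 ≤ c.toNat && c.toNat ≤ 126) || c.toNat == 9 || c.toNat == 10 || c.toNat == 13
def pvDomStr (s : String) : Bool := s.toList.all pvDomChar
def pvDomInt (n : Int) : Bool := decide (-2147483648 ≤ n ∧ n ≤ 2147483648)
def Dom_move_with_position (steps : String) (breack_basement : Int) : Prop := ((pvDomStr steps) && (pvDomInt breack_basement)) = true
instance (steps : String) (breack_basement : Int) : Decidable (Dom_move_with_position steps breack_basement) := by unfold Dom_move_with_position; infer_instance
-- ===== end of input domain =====

-- B replaces A's single stateful break-loop by a materialized prefix-sum table plus a first-match scan (alternative decomposition, same cost).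


-- ===== PORT A =====
-- A's for-loop with break, as structural recursion over the character list.
def moveLoopA : List Char → Int → Int → Int → Int × Int
  | [], iterator, position, _ => (iterator, position)
  | step :: rest, iterator, position, tgt =>
    let position := position + 1
    let iterator := if step = '(' then iterator + 1 else iterator
    let iterator := if step = ')' then iterator - 1 else iterator
    if iterator = tgt then (iterator, position)
    else moveLoopA rest iterator position tgt

def move_with_position (steps : String) (breack_basement : Int) : List (String × Int) :=
  let r := moveLoopA steps.toList 0 0 breack_basement
  [("move", r.1), ("position", r.2)]

-- ===== PORT B =====
-- per-character deltas
def pvDeltas (l : List Char) : List Int :=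
  l.map (fun c => if c = '(' then (1 : Int) else if c = ')' then -1 else 0)

-- running total: the full cumulative-sum list
def pvPrefix : List Int → Int → List Int
  | [], _ => []
  | d :: rest, total => (total + d) :: pvPrefix rest (total + d)

-- enumerate-scan: first (value, index+1) whose value equals the target
def pvFindHit : List Int → Int → Int → Option (Int × Int)
  | [], _, _ => none
  | v :: rest, tgt, i => if v = tgt then some (v, i + 1) else pvFindHit rest tgt (i + 1)

def move_with_position_alt (steps : String) (breack_basement : Int) : List (String × Int) :=
  let pre := pvPrefix (pvDeltas steps.toList) 0
  match pvFindHit pre breack_basement 0 with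
  | some (v, p) => [("move", v), ("position", p)]
  | none => [("move", pre.getLast?.getD 0), ("position", (pre.length : Int))]

-- ===== PRECONDITION & SPEC =====
def Spec_move_with_position (steps : String) (breack_basement : Int) (out : List (String × Int)) : Prop := out = move_with_position_alt steps breack_basement
instance (steps : String) (breack_basement : Int) (out : List (String × Int)) : Decidable (Spec_move_with_position steps breack_basement out) := by unfold Spec_move_with_position; infer_instance

-- ===== CLAIM (what is proved, stated in full; the proofs are below) =====
def Claim_equal_move_with_position : Prop := ∀ (steps : String) (breack_basement : Int), Dom_move_with_position steps breack_basement → Spec_move_with_position steps breack_basement (move_with_position steps breack_basement)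

-- ===== LEMMAS AND PROOFS =====

theorem pvPrefix_length (l : List Int) (t : Int) : (pvPrefix l t).length = l.length := by
  induction l generalizing t with
  | nil => rfl
  | cons d rest ih => simp [pvPrefix, ih]

theorem pvDeltas_cons (c : Char) (rest : List Char) :
    pvDeltas (c :: rest) =
      (if c = '(' then (1 : Int) else if c = ')' then -1 else 0) :: pvDeltas rest := rfl

theorem getLast?_getD_cons (x : Int) (xs : List Int) (d : Int) :
    ((x :: xs).getLast?.getD d) = xs.getLast?.getD x := by
  cases xs with
  | nil => rfl
  | cons y ys =>
    rw [List.getLast?_cons_cons]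
    cases h : (y :: ys).getLast? with
    | none => simp [List.getLast?_eq_none_iff] at h
    | some a => simp

-- Invariant: A's break-loop equals B's scan of the prefix-sum table built from the same state.
theorem loop_eq_scan (l : List Char) (it pos tgt : Int) :
    moveLoopA l it pos tgt =
      match pvFindHit (pvPrefix (pvDeltas l) it) tgt pos with
      | some (v, p) => (v, p)
      | none => ((pvPrefix (pvDeltas l) it).getLast?.getD it, pos + (l.length : Int)) := by
  induction l generalizing it pos with
  | nil => simp [moveLoopA, pvDeltas, pvPrefix, pvFindHit]
  | cons c rest ih =>
    have hd : (if c = ')' then (if c = '(' then it + 1 else it) - 1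
               else (if c = '(' then it + 1 else it)) =
              it + (if c = '(' then (1 : Int) else if c = ')' then -1 else 0) := by
      by_cases h1 : c = '('
      · subst h1; simp
      · by_cases h2 : c = ')'
        · simp [h2]; ring
        · simp [h1, h2]
    rw [pvDeltas_cons]
    simp only [moveLoopA, pvPrefix, pvFindHit, hd]
    by_cases hit : it + (if c = '(' then (1 : Int) else if c = ')' then -1 else 0) = tgt
    · simp [hit]
    · simp only [hit, ite_false]
      rw [ih]
      cases hfh : pvFindHit (pvPrefix (pvDeltas rest)
          (it + (if c = '(' then (1 : Int) else if c = ')' then -1 else 0))) tgt (pos + 1) with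
      | some vp => simp
      | none =>
        simp only [getLast?_getD_cons, List.length_cons, Prod.mk.injEq]
        exact ⟨by simp, by push_cast; ring⟩

-- ===== VERDICT (by name: the statement is the Claim_ definition above) =====
theorem move_with_position_spec : Claim_equal_move_with_position := by
  intro steps tgt _
  unfold Spec_move_with_position move_with_position move_with_position_alt
  rw [loop_eq_scan]
  cases hfh : pvFindHit (pvPrefix (pvDeltas steps.toList) 0) tgt 0 with
  | some vp => simp [hfh]
  | none =>
    simp only [pvDeltas] at hfh
    simp [hfh, pvPrefix_length, pvDeltas]
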